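-- pv_equiv track=rewrite | github.com/anon-iclr-snows/SNOWS | SNOWS/SNOWS.py | generate_M_sized_groups
-- ===== SOURCE A (Python) =====
-- def generate_M_sized_groups(d_in, k_h, k_w, M):
--     overall_groups = set()
--     groups = []
--
--     num_vars = int(d_in * k_h * k_w)
--
--     for i in range(num_vars):
--         # Check if the last index in the potential group is within the bounds
--         if i not in overall_groups and i + k_h * k_w * (M - 1) < num_vars:
--             group_i = [i + k_h * k_w * j for j in range(M)]
--             groups.append(group_i)
--
--             for j in group_i:
--                 overall_groups.add(j)
--
--     return groups
-- ===== SOURCE B (Python) =====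
-- def generate_M_sized_groups(d_in, k_h, k_w, M):
--     s = k_h * k_w
--     if s <= 0:
--         return []
--     groups = []
--     for cg in range(d_in // M):
--         base = cg * M * s
--         for r in range(s):
--             groups.append([base + r + s * j for j in range(M)])
--     return groups
-- ===== Notes on version B (the rewrite author's own statement) =====
-- stated objective: simpler
-- what changed: B drops A's visited-set greedy scan over all num_vars indices and directly enumerates the groups: for each channel block cg in range(d_in//M) and each spatial offset r in range(k_h*k_w) it emits [cg*M*s + r + s*j for j in range(M)], producing the identical list in the identical order.
-- intended difference: When k_h*k_w < 0 and d_in*k_h*k_w > 0 (negative dimensions, so d_in < 0), A returns overlapping groups of negative indices (its bound check is vacuously true there), while B returns []; no valid index groups exist for negative dimensions, so B's empty answer is the intended one. — e.g. on generate_M_sized_groups(-2, -1, 1, 2): A returns [[0, -1], [1, 0]], B returns []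
-- outside the precondition, e.g. on generate_M_sized_groups(2, 1, 1, 0): A returns [[], []], B raises ZeroDivisionError; on generate_M_sized_groups(2, 1, 1, -1): A returns [[], []], B returns []
import Mathlib
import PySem

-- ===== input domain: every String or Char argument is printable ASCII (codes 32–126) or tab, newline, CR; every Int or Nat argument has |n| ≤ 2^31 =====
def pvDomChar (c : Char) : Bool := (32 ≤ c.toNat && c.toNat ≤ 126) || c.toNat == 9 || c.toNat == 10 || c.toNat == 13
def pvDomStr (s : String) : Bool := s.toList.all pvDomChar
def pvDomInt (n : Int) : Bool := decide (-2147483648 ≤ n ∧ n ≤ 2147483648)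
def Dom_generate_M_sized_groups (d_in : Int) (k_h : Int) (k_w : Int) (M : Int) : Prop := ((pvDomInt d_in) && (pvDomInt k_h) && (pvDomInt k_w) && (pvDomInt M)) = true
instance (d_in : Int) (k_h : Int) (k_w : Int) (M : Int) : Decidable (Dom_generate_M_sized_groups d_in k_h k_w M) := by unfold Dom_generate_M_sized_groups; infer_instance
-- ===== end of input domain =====

-- B replaces A's visited-set greedy scan by direct enumeration of the channel-block groups
-- (simpler: no set, no membership scan); equivalence is about the return value.

-- ===== PORT A =====
def generate_M_sized_groups (d_in : Int) (k_h : Int) (k_w : Int) (M : Int) : List (List Int) :=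
  let num_vars : Int := d_in * k_h * k_w
  ((PySem.List.pyRange 0 num_vars 1).foldl
    (fun (st : PySem.Set Int × List (List Int)) i =>
      if PySem.Set.contains st.1 i = false ∧ i + k_h * k_w * (M - 1) < num_vars then
        let group_i : List Int := (PySem.List.pyRange 0 M 1).map (fun j => i + k_h * k_w * j)
        (group_i.foldl (fun ov j => PySem.Set.add ov j) st.1, st.2 ++ [group_i])
      else st)
    ((PySem.Set.empty : PySem.Set Int), ([] : List (List Int)))).2

-- ===== PORT B =====
def generate_M_sized_groups_alt (d_in : Int) (k_h : Int) (k_w : Int) (M : Int) : List (List Int) :=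
  let s : Int := k_h * k_w
  if s ≤ 0 then [] else
  (PySem.List.pyRange 0 (PySem.Int.floordiv d_in M) 1).foldl
    (fun groups cg =>
      let base : Int := cg * M * s
      (PySem.List.pyRange 0 s 1).foldl
        (fun gs r => gs ++ [(PySem.List.pyRange 0 M 1).map (fun j => base + r + s * j)])
        groups)
    []

-- ===== PRECONDITION & SPEC =====
-- Pre_ restricts to the natural domain M ≥ 1 (a group of M ≤ 0 indices is meaningless): for M ≤ 0
-- A's returned value — copies of the empty group — is an artefact of range(M) being empty, and
-- B's own algorithm raises ZeroDivisionError at M = 0.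
def Pre_generate_M_sized_groups (d_in : Int) (k_h : Int) (k_w : Int) (M : Int) : Prop := 1 ≤ M
instance (d_in : Int) (k_h : Int) (k_w : Int) (M : Int) : Decidable (Pre_generate_M_sized_groups d_in k_h k_w M) := by unfold Pre_generate_M_sized_groups; infer_instance
def pvWitness_generate_M_sized_groups : Int × Int × Int × Int := (5, 2, 1, 2)

-- When k_h*k_w < 0 and d_in*k_h*k_w > 0 (negative dimensions, so d_in < 0), A returns overlapping
-- groups of negative indices (its bound check is vacuously true there) while B returns []; no valid
-- index groups exist for negative dimensions, so B's empty answer is the intended one.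
def D_generate_M_sized_groups (d_in : Int) (k_h : Int) (k_w : Int) (M : Int) : Prop :=
  1 ≤ M ∧ k_h * k_w < 0 ∧ 0 < d_in * (k_h * k_w)
instance (d_in : Int) (k_h : Int) (k_w : Int) (M : Int) : Decidable (D_generate_M_sized_groups d_in k_h k_w M) := by unfold D_generate_M_sized_groups; infer_instance

def Spec_generate_M_sized_groups (d_in : Int) (k_h : Int) (k_w : Int) (M : Int) (out : List (List Int)) : Prop := ¬ D_generate_M_sized_groups d_in k_h k_w M → out = generate_M_sized_groups_alt d_in k_h k_w M
instance (d_in : Int) (k_h : Int) (k_w : Int) (M : Int) (out : List (List Int)) : Decidable (Spec_generate_M_sized_groups d_in k_h k_w M out) := by unfold Spec_generate_M_sized_groups; infer_instance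

def pvDiffWitness_generate_M_sized_groups : Int × Int × Int × Int := (-2, -1, 1, 2)
def pvDiffWitnessOut_generate_M_sized_groups : (List (List Int)) × (List (List Int)) := ([[0, -1], [1, 0]], [])

-- ===== CLAIM (what is proved, stated in full; the proofs are below) =====
def Claim_unchanged_generate_M_sized_groups : Prop := ∀ (d_in : Int) (k_h : Int) (k_w : Int) (M : Int), Dom_generate_M_sized_groups d_in k_h k_w M → Pre_generate_M_sized_groups d_in k_h k_w M → Spec_generate_M_sized_groups d_in k_h k_w M (generate_M_sized_groups d_in k_h k_w M)
def Claim_changed_generate_M_sized_groups : Prop := Dom_generate_M_sized_groups (pvDiffWitness_generate_M_sized_groups.1) (pvDiffWitness_generate_M_sized_groups.2.1) (pvDiffWitness_generate_M_sized_groups.2.2.1) (pvDiffWitness_generate_M_sized_groups.2.2.2) ∧ Pre_generate_M_sized_groups (pvDiffWitness_generate_M_sized_groups.1) (pvDiffWitness_generate_M_sized_groups.2.1) (pvDiffWitness_generate_M_sized_groups.2.2.1) (pvDiffWitness_generate_M_sized_groups.2.2.2) ∧ D_generate_M_sized_groups (pvDiffWitness_generate_M_sized_groups.1) (pvDiffWitness_generate_M_sized_groups.2.1)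 (pvDiffWitness_generate_M_sized_groups.2.2.1) (pvDiffWitness_generate_M_sized_groups.2.2.2) ∧ generate_M_sized_groups (pvDiffWitness_generate_M_sized_groups.1) (pvDiffWitness_generate_M_sized_groups.2.1) (pvDiffWitness_generate_M_sized_groups.2.2.1) (pvDiffWitness_generate_M_sized_groups.2.2.2) = pvDiffWitnessOut_generate_M_sized_groups.1 ∧ generate_M_sized_groups_alt (pvDiffWitness_generate_M_sized_groups.1) (pvDiffWitness_generate_M_sized_groups.2.1) (pvDiffWitness_generate_M_sized_groups.2.2.1) (pvDiffWitness_generate_M_sized_groups.2.2.2) = pvDiffWitnessOut_generate_M_sized_groups.2 ∧ pvDiffWitnessOut_generate_M_sized_groups.1 ≠ pvDiffWitnessOut_generate_M_sized_groups.2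
def Claim_exact_generate_M_sized_groups : Prop := ∀ (d_in : Int) (k_h : Int) (k_w : Int) (M : Int), Dom_generate_M_sized_groups d_in k_h k_w M → Pre_generate_M_sized_groups d_in k_h k_w M → D_generate_M_sized_groups d_in k_h k_w M → generate_M_sized_groups d_in k_h k_w M ≠ generate_M_sized_groups_alt d_in k_h k_w M

-- ===== LEMMAS AND PROOFS =====

def pvStart (s M d t : Int) : Prop :=
  ∃ q r : Int, 0 ≤ q ∧ 0 ≤ r ∧ r < s ∧ q * M + M ≤ d ∧ t = q * (M * s) + r

def pvCov (s M d t i : Int) : Prop :=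
  ∃ q r j : Int, 0 ≤ q ∧ 0 ≤ r ∧ r < s ∧ 0 ≤ j ∧ j < M ∧ q * M + M ≤ d ∧
    i = q * (M * s) + r + s * j ∧ q * (M * s) + r < t

def pvGroup (s M t : Int) : List Int := (PySem.List.pyRange 0 M 1).map (fun j => t + s * j)

def pvStarts (s M d : Int) : List Int :=
  (PySem.List.pyRange 0 (PySem.Int.floordiv d M) 1).flatMap
    (fun q => PySem.List.pyRange (q * (M * s)) (q * (M * s) + s) 1)

lemma pvDivUnique {s a r a' r' : Int} (hs : 0 < s) (hr : 0 ≤ r) (hr2 : r < s)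
    (hr' : 0 ≤ r') (hr2' : r' < s) (h : a * s + r = a' * s + r') : a = a' ∧ r = r' := by
  rcases lt_trichotomy a a' with h1 | h1 | h1
  · nlinarith
  · constructor <;> [exact h1; nlinarith]
  · nlinarith

lemma pvUnique {s M q r j q' r' : Int} (hs : 0 < s) (hM : 0 < M)
    (hr : 0 ≤ r) (hr2 : r < s) (hj : 0 ≤ j) (hj2 : j < M) (hr' : 0 ≤ r') (hr2' : r' < s)
    (h : q * (M * s) + r + s * j = q' * (M * s) + r') : q = q' ∧ r = r' ∧ j = 0 := by
  have h1 : (q * M + j) * s + r = (q' * M) * s + r' := by ring_nf; ring_nf at h; linarith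
  obtain ⟨h2, h3⟩ := pvDivUnique hs hr hr2 hr' hr2' h1
  have h4 : q * M + j = q' * M + 0 := by omega
  obtain ⟨h5, h6⟩ := pvDivUnique hM hj hj2 (le_refl 0) hM h4
  exact ⟨h5, h3, h6⟩

lemma pvMem_starts {s M d : Int} (_hs : 1 ≤ s) (hM : 1 ≤ M) (x : Int) :
    x ∈ pvStarts s M d ↔ pvStart s M d x := by
  unfold pvStarts pvStart
  rw [PySem.Int.floordiv_eq_ediv_of_pos (by omega : (0:Int) < M)]
  simp only [List.mem_flatMap, PySem.List.mem_pyRange_one]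
  constructor
  · rintro ⟨q, ⟨hq0, hqg⟩, hx1, hx2⟩
    refine ⟨q, x - q * (M * s), hq0, by omega, by omega, ?_, by ring⟩
    have : q + 1 ≤ d / M := hqg
    have := (Int.le_ediv_iff_mul_le (by omega : (0:Int) < M)).1 this
    nlinarith
  · rintro ⟨q, r, hq0, hr0, hrs, hqd, rfl⟩
    refine ⟨q, ⟨hq0, ?_⟩, by nlinarith, by nlinarith⟩
    rw [Int.lt_iff_add_one_le, Int.le_ediv_iff_mul_le (by omega : (0:Int) < M)]
    nlinarith

lemma pvStarts_sorted {s M d : Int} (hs : 1 ≤ s) (hM : 1 ≤ M) :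
    (pvStarts s M d).Pairwise (· < ·) := by
  unfold pvStarts
  rw [List.pairwise_flatMap]
  constructor
  · intro a _; exact PySem.List.pairwise_lt_pyRange_one _ _
  · have := PySem.List.pairwise_lt_pyRange_one 0 (PySem.Int.floordiv d M)
    refine this.imp_of_mem ?_
    intro a b ha hb hab x hx y hy
    rw [PySem.List.mem_pyRange_one] at hx hy ha hb
    have h1 : a * (M * s) + M * s ≤ b * (M * s) := by nlinarith [mul_le_mul_of_nonneg_right (show a + 1 ≤ b by omega) (show (0:Int) ≤ M * s by nlinarith)]
    nlinarith

lemma pvFilter_head {l : List Int} {t : Int} (hp : l.Pairwise (· < ·)) (ht : t ∈ l) :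
    l.filter (fun x => decide (t ≤ x)) = t :: l.filter (fun x => decide (t + 1 ≤ x)) := by
  induction l with
  | nil => cases ht
  | cons a l ih =>
    rcases List.pairwise_cons.1 hp with ⟨ha, hp'⟩
    rcases List.mem_cons.1 ht with rfl | htl
    · simp only [List.filter_cons, decide_eq_true_eq]
      rw [if_pos (le_refl t), if_neg (by omega)]
      congr 1
      apply List.filter_congr
      intro x hx
      have := ha x hx
      simp only [decide_eq_decide]
      omega
    · have hat : a < t := ha t htl
      simp only [List.filter_cons, decide_eq_true_eq]
      rw [if_neg (by omega), if_neg (by omega)]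
      exact ih hp' htl

lemma pvFilter_not_mem {l : List Int} {t : Int} (ht : t ∉ l) :
    l.filter (fun x => decide (t ≤ x)) = l.filter (fun x => decide (t + 1 ≤ x)) := by
  apply List.filter_congr
  intro x hx
  have : x ≠ t := fun h => ht (h ▸ hx)
  simp only [decide_eq_decide]
  omega

-- covering relation: step characterizations
lemma pvCov_zero {s M d : Int} (hs : 1 ≤ s) (hM : 1 ≤ M) (i : Int) : ¬ pvCov s M d 0 i := by
  rintro ⟨q, r, j, hq, hr, hrs, hj, hjM, hqd, hi, hlt⟩
  nlinarith [mul_nonneg hq (show (0:Int) ≤ M * s by nlinarith)]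

lemma pvStart_nonneg {s M d t : Int} (hs : 1 ≤ s) (hM : 1 ≤ M) (h : pvStart s M d t) : 0 ≤ t := by
  obtain ⟨q, r, hq, hr, hrs, hqd, rfl⟩ := h
  nlinarith [mul_nonneg hq (show (0:Int) ≤ M * s by nlinarith)]

lemma pvStart_lt {s M d t : Int} (hs : 1 ≤ s) (hM : 1 ≤ M) (h : pvStart s M d t) : t < d * s := by
  obtain ⟨q, r, hq, hr, hrs, hqd, rfl⟩ := h
  nlinarith

-- at a start t, t itself is not covered yet
lemma pvCov_self_of_start {s M d t : Int} (hs : 1 ≤ s) (hM : 1 ≤ M)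
    (h : pvStart s M d t) : ¬ pvCov s M d t t := by
  obtain ⟨q, r, hq, hr, hrs, hqd, rfl⟩ := h
  rintro ⟨q', r', j', hq', hr', hrs', hj', hjM', hqd', hi, hlt⟩
  obtain ⟨e1, e2, e3⟩ := pvUnique (by omega) (by omega) hr' hrs' hj' hjM' hr hrs hi.symm
  rw [e1, e2] at hlt
  omega

-- if condition passes (not covered + bound) then t is a start
lemma pvStart_of_uncov {s M d t : Int} (hs : 1 ≤ s) (hM : 1 ≤ M) (ht : 0 ≤ t)
    (hcov : ¬ pvCov s M d t t) (hb : t + s * (M - 1) < d * s) : pvStart s M d t := by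
  have hMs : (0:Int) < M * s := by nlinarith
  set q := t / (M * s) with hqdef
  set u := t % (M * s) with hudef
  have hu0 : 0 ≤ u := Int.emod_nonneg t (by omega)
  have huM : u < M * s := Int.emod_lt_of_pos t hMs
  have htu : t = q * (M * s) + u := by
    rw [hqdef, hudef]
    linear_combination - Int.mul_ediv_add_emod t (M * s)
  set e := u / s with hedef
  set r := u % s with hrdef
  have hr0 : 0 ≤ r := Int.emod_nonneg u (by omega)
  have hrs : r < s := Int.emod_lt_of_pos u (by omega)
  have hue : u = e * s + r := by
    rw [hedef, hrdef]
    linear_combination - Int.mul_ediv_add_emod u s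
  have he0 : 0 ≤ e := Int.ediv_nonneg hu0 (by omega)
  have heM : e < M := by
    rw [hedef]
    exact (Int.ediv_lt_iff_lt_mul (by omega)).2 huM
  have hq0 : 0 ≤ q := Int.ediv_nonneg ht (by omega)
  -- bound gives q*M + e + M ≤ d
  have hbd : q * M + e + M ≤ d := by
    have h1 : (q * M + e + M - 1) * s + r < d * s := by nlinarith
    have h2 : (q * M + e + M - 1) * s < d * s := by nlinarith
    have h3 : q * M + e + M - 1 < d := by
      exact lt_of_mul_lt_mul_right h2 (by omega)
    omega
  by_cases he : e = 0
  · exact ⟨q, r, hq0, hr0, hrs, by omega, by rw [htu, hue, he]; ring⟩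
  · exfalso
    apply hcov
    exact ⟨q, r, e, hq0, hr0, hrs, he0, heM, by omega, by rw [htu, hue]; ring,
      by linarith [htu, hue, mul_pos (show (0:Int) < e by omega) (show (0:Int) < s by omega)]⟩

-- covering after an emitted start
lemma pvCov_succ_start {s M d t : Int} (hs : 1 ≤ s) (hM : 1 ≤ M)
    (h : pvStart s M d t) (i : Int) :
    pvCov s M d (t + 1) i ↔ pvCov s M d t i ∨ ∃ j, 0 ≤ j ∧ j < M ∧ i = t + s * j := by
  obtain ⟨q, r, hq, hr, hrs, hqd, rfl⟩ := h
  constructor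
  · rintro ⟨q', r', j', hq', hr', hrs', hj', hjM', hqd', rfl, hlt⟩
    rcases lt_or_eq_of_le (by omega : q' * (M * s) + r' ≤ q * (M * s) + r) with hlt' | heq
    · exact Or.inl ⟨q', r', j', hq', hr', hrs', hj', hjM', hqd', rfl, hlt'⟩
    · have h1 : (q' * M) * s + r' = (q * M) * s + r := by linear_combination heq
      obtain ⟨e1, e2⟩ := pvDivUnique (show (0:Int) < s by omega) hr' hrs' hr hrs h1
      have e3 : q' = q := mul_right_cancel₀ (show (M:Int) ≠ 0 by omega) e1
      exact Or.inr ⟨j', hj', hjM', by rw [e3, e2]⟩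
  · rintro (⟨q', r', j', hq', hr', hrs', hj', hjM', hqd', rfl, hlt⟩ | ⟨j, hj, hjM, rfl⟩)
    · exact ⟨q', r', j', hq', hr', hrs', hj', hjM', hqd', rfl, by omega⟩
    · exact ⟨q, r, j, hq, hr, hrs, hj, hjM, hqd, by ring, by omega⟩

-- covering unchanged when t is not a start
lemma pvCov_succ_not_start {s M d t : Int} (_hs : 1 ≤ s) (_hM : 1 ≤ M)
    (h : ¬ pvStart s M d t) (i : Int) :
    pvCov s M d (t + 1) i ↔ pvCov s M d t i := by
  constructor
  · rintro ⟨q, r, j, hq, hr, hrs, hj, hjM, hqd, rfl, hlt⟩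
    rcases lt_or_eq_of_le (by omega : q * (M * s) + r ≤ t) with hlt' | heq
    · exact ⟨q, r, j, hq, hr, hrs, hj, hjM, hqd, rfl, hlt'⟩
    · exact absurd ⟨q, r, hq, hr, hrs, hqd, heq.symm⟩ h
  · rintro ⟨q, r, j, hq, hr, hrs, hj, hjM, hqd, rfl, hlt⟩
    exact ⟨q, r, j, hq, hr, hrs, hj, hjM, hqd, rfl, by omega⟩

lemma pvLoopA (s M d : Int) (hs : 1 ≤ s) (hM : 1 ≤ M) :
    ∀ (k : Nat) (t : Int), 0 ≤ t → (d * s - t).toNat = k →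
    ∀ (V : PySem.Set Int) (G : List (List Int)),
    (∀ i : Int, PySem.Set.contains V i = true ↔ pvCov s M d t i) →
    ((PySem.List.pyRange t (d * s) 1).foldl
       (fun (st : PySem.Set Int × List (List Int)) i =>
         if PySem.Set.contains st.1 i = false ∧ i + s * (M - 1) < d * s then
           let group_i : List Int := (PySem.List.pyRange 0 M 1).map (fun j => i + s * j)
           (group_i.foldl (fun ov j => PySem.Set.add ov j) st.1, st.2 ++ [group_i])
         else st)
       (V, G)).2
    = G ++ (((pvStarts s M d).filter (fun x => decide (t ≤ x))).map (pvGroup s M)) := by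
  intro k
  induction k with
  | zero =>
    intro t ht hk V G hV
    have hts : d * s ≤ t := by omega
    have h1 : PySem.List.pyRange t (d * s) 1 = [] := by
      rw [PySem.List.pyRange_one]
      simp [show (d * s - t).toNat = 0 by omega]
    have h2 : (pvStarts s M d).filter (fun x => decide (t ≤ x)) = [] := by
      rw [List.filter_eq_nil_iff]
      intro x hx
      have := pvStart_lt hs hM ((pvMem_starts hs hM x).1 hx)
      simp only [decide_eq_true_eq]
      omega
    simp [h1, h2]
  | succ k ih =>
    intro t ht hk V G hV
    have htlt : t < d * s := by omega
    rw [PySem.List.pyRange_one_cons htlt, List.foldl_cons]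
    by_cases hst : pvStart s M d t
    · have hc1 : PySem.Set.contains V t = false := by
        rw [Bool.eq_false_iff]
        intro hcontr
        exact pvCov_self_of_start hs hM hst ((hV t).1 hcontr)
      have hc2 : t + s * (M - 1) < d * s := by
        obtain ⟨q, r, hq, hr, hrs, hqd, rfl⟩ := hst
        nlinarith
      rw [if_pos ⟨hc1, hc2⟩]
      have hinv : ∀ i : Int,
          PySem.Set.contains (((PySem.List.pyRange 0 M 1).map (fun j => t + s * j)).foldl
            (fun ov j => PySem.Set.add ov j) V) i = true ↔ pvCov s M d (t + 1) i := by
        intro i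
        rw [PySem.Set.contains_iff]
        rw [show (fun (ov : PySem.Set Int) (j : Int) => PySem.Set.add ov j)
              = (fun (ov : PySem.Set Int) (j : Int) => PySem.Set.add ov (id j)) from rfl]
        rw [PySem.Set.mem_foldl_add]
        rw [pvCov_succ_start hs hM hst i]
        rw [← PySem.Set.contains_iff, hV i]
        simp only [List.mem_map, PySem.List.mem_pyRange_one, id]
        constructor
        · rintro (h | ⟨b, ⟨j, ⟨hj0, hjM⟩, rfl⟩, rfl⟩)
          · exact Or.inl h
          · exact Or.inr ⟨j, hj0, hjM, rfl⟩
        · rintro (h | ⟨j, hj0, hjM, rfl⟩)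
          · exact Or.inl h
          · exact Or.inr ⟨t + s * j, ⟨j, ⟨hj0, hjM⟩, rfl⟩, rfl⟩
      rw [ih (t + 1) (by omega) (by omega) _ _ hinv]
      rw [pvFilter_head (pvStarts_sorted hs hM) ((pvMem_starts hs hM t).2 hst)]
      simp [pvGroup]
    · have hcond : ¬ (PySem.Set.contains V t = false ∧ t + s * (M - 1) < d * s) := by
        rintro ⟨hc1, hc2⟩
        apply hst
        apply pvStart_of_uncov hs hM ht _ hc2
        intro hcov
        have := (hV t).2 hcov
        rw [hc1] at this
        exact Bool.false_ne_true this
      rw [if_neg hcond]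
      have hinv : ∀ i : Int, PySem.Set.contains V i = true ↔ pvCov s M d (t + 1) i := by
        intro i
        rw [hV i, pvCov_succ_not_start hs hM hst i]
      rw [ih (t + 1) (by omega) (by omega) _ _ hinv]
      rw [pvFilter_not_mem (fun hmem => hst ((pvMem_starts hs hM t).1 hmem))]



lemma pvA_norm (d_in k_h k_w M : Int) (hs : 1 ≤ k_h * k_w) (hM : 1 ≤ M) :
    generate_M_sized_groups d_in k_h k_w M
      = (pvStarts (k_h * k_w) M d_in).map (pvGroup (k_h * k_w) M) := by
  simp only [generate_M_sized_groups]
  rw [show d_in * k_h * k_w = d_in * (k_h * k_w) from mul_assoc _ _ _]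
  rw [pvLoopA (k_h * k_w) M d_in hs hM (d_in * (k_h * k_w)).toNat 0 (le_refl 0) (by omega)
      PySem.Set.empty [] ?inv]
  · rw [List.filter_eq_self.2 ?all]
    · simp
    case all =>
      intro x hx
      simp only [decide_eq_true_eq]
      exact pvStart_nonneg hs hM ((pvMem_starts hs hM x).1 hx)
  case inv =>
    intro i
    exact iff_of_false (by simp [PySem.Set.empty]) (pvCov_zero hs hM i)

lemma pvB_norm (d_in k_h k_w M : Int) (hs : 1 ≤ k_h * k_w) (hM : 1 ≤ M) :
    generate_M_sized_groups_alt d_in k_h k_w M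
      = (pvStarts (k_h * k_w) M d_in).map (pvGroup (k_h * k_w) M) := by
  simp only [generate_M_sized_groups_alt, PySem.List.foldl_append_singleton_eq_map,
    PySem.List.foldl_append_eq_flatMap, List.nil_append]
  rw [if_neg (by omega : ¬ k_h * k_w ≤ 0)]
  rw [pvStarts, List.map_flatMap]
  congr 1
  funext q
  have hlen : q * (M * (k_h * k_w)) + (k_h * k_w) - q * (M * (k_h * k_w)) = k_h * k_w - 0 := by
    ring
  simp only [PySem.List.pyRange_one, hlen, List.map_map, Function.comp_def, pvGroup]
  apply List.map_congr_left
  intro k _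
  apply List.map_congr_left
  intro j _
  ring

lemma pvA_empty (d_in k_h k_w M : Int) (hn : d_in * k_h * k_w ≤ 0) :
    generate_M_sized_groups d_in k_h k_w M = [] := by
  simp only [generate_M_sized_groups]
  have h1 : PySem.List.pyRange 0 (d_in * k_h * k_w) 1 = [] := by
    rw [PySem.List.pyRange_one, show (d_in * k_h * k_w - 0).toNat = 0 by omega]
    simp
  rw [h1]
  rfl

lemma pvB_empty_s (d_in k_h k_w M : Int) (hs : k_h * k_w ≤ 0) :
    generate_M_sized_groups_alt d_in k_h k_w M = [] := by
  simp only [generate_M_sized_groups_alt]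
  rw [if_pos hs]

lemma pvLen_mono (c nv M : Int) :
    ∀ (l : List Int) (st : PySem.Set Int × List (List Int)),
    ((l.foldl
      (fun (st : PySem.Set Int × List (List Int)) i =>
        if PySem.Set.contains st.1 i = false ∧ i + c * (M - 1) < nv then
          let group_i : List Int := (PySem.List.pyRange 0 M 1).map (fun j => i + c * j)
          (group_i.foldl (fun ov j => PySem.Set.add ov j) st.1, st.2 ++ [group_i])
        else st)
      st)).2 = [] → st.2 = [] := by
  intro l
  induction l with
  | nil => intro st h; simpa using h
  | cons a l ih =>
    intro st
    rw [List.foldl_cons]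
    by_cases h : PySem.Set.contains st.1 a = false ∧ a + c * (M - 1) < nv
    · rw [if_pos h]
      intro hnil
      have := ih _ hnil
      simp at this
    · rw [if_neg h]
      exact ih st


-- ===== VERDICT (by name: the statement is the Claim_ definition above) =====
theorem generate_M_sized_groups_spec : Claim_unchanged_generate_M_sized_groups := by
  intro d_in k_h k_w M _hDom hPre hnD
  have hM : 1 ≤ M := hPre
  by_cases hs1 : 1 ≤ k_h * k_w
  · rw [pvA_norm _ _ _ _ hs1 hM, pvB_norm _ _ _ _ hs1 hM]
  · have hs0 : k_h * k_w ≤ 0 := by omega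
    have hn : d_in * (k_h * k_w) ≤ 0 := by
      rcases lt_or_eq_of_le hs0 with hlt | heq
      · by_contra hpos
        exact hnD ⟨hM, hlt, by omega⟩
      · rw [heq, mul_zero]
    rw [pvA_empty _ _ _ _ (by rw [mul_assoc]; exact hn), pvB_empty_s _ _ _ _ hs0]

theorem generate_M_sized_groups_changed : Claim_changed_generate_M_sized_groups := by
  unfold Claim_changed_generate_M_sized_groups; decide

theorem generate_M_sized_groups_tight : Claim_exact_generate_M_sized_groups := by
  intro d_in k_h k_w M _hDom _hPre hD
  obtain ⟨hM, hsneg, hnpos⟩ := hD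
  rw [pvB_empty_s _ _ _ _ (le_of_lt hsneg)]
  have hn : 0 < d_in * k_h * k_w := by rw [mul_assoc]; exact hnpos
  intro hEq
  simp only [generate_M_sized_groups] at hEq
  rw [PySem.List.pyRange_one_cons (by omega : (0:Int) < d_in * k_h * k_w), List.foldl_cons] at hEq
  rw [if_pos ?cond] at hEq
  · have := pvLen_mono (k_h * k_w) (d_in * k_h * k_w) M _ _ hEq
    simp at this
  case cond =>
    constructor
    · rfl
    · have : k_h * k_w * (M - 1) ≤ 0 :=
        mul_nonpos_of_nonpos_of_nonneg (le_of_lt hsneg) (by omega)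
      omega
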